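-- pv_equiv track=rewrite | github.com/bokarozukiakihisa-debug/table-structuring-test | scripts/parse_and_validate.py | largest_json_block
-- ===== SOURCE A (Python) =====
-- def largest_json_block(text: str):
--     start_idx = None
--     depth = 0
--     best = None
--     for i, ch in enumerate(text):
--         if ch == '{':
--             if depth == 0:
--                 start_idx = i
--             depth += 1
--         elif ch == '}':
--             if depth > 0:
--                 depth -= 1
--                 if depth == 0 and start_idx is not None:
--                     cand = text[start_idx:i+1]
--                     if best is None or len(cand) > len(best):
--                         best = cand
--     return best
-- ===== SOURCE B (Python) =====
-- def _match(text, i):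
--     # scan forward from i for the '}' that balances the braces seen since i
--     depth = 0
--     for k in range(i, len(text)):
--         c = text[k]
--         if c == '{':
--             depth += 1
--         elif c == '}':
--             depth -= 1
--             if depth == 0:
--                 return k
--     return None
--
--
-- def largest_json_block(text: str):
--     best = None  # (start, end) of the longest closed top-level block
--     i = text.find('{')
--     while i != -1:
--         j = _match(text, i)
--         if j is None:
--             break  # unclosed top-level brace: nothing further can close
--         if best is None or j - i > best[1] - best[0]:
--             best = (i, j)
--         i = text.find('{', j + 1)
--     return None if best is None else text[best[0]:best[1] + 1]
-- ===== Notes on version B (the rewrite author's own statement) =====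
-- stated objective: faster
-- what changed: A makes one uniform pass over every character maintaining a depth counter, remembered start index and the best slice; B works block by block: str.find locates the next opening brace, a bounded matcher scans for its balancing closer, the longer (start,end) span is kept, the scan jumps past the whole block, stops early at an unclosed top-level opener, and the text is sliced once at the end.
import Mathlib
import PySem

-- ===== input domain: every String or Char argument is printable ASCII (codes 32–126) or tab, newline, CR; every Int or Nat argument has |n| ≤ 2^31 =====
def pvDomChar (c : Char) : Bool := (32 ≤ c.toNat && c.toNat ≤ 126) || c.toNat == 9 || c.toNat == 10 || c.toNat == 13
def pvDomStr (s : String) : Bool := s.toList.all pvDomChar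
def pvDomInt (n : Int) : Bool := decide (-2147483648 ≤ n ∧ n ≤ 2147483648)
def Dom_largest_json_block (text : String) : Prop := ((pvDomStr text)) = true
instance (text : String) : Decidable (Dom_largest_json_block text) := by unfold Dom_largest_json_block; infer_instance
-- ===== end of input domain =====

-- B replaces A's uniform single pass (depth counter over every character, slicing each closed
-- candidate) by a block-by-block skip-scan: find the next opening brace, run a bounded matcher
-- for its balancing closer, record the span, jump past the whole block (stopping early at an
-- unclosed top-level opener), and slice the text once at the end (objective: faster, measured
-- constant-factor).

-- ===== PORT A =====
-- A's loop state (start_idx, depth, best); strings handled as List Char, slice = Python text[s:i+1]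
def pvStepA (cs : List Char) (st : Option Int × Int × Option (List Char)) (p : Int × Char) :
    Option Int × Int × Option (List Char) :=
  let (start_idx, depth, best) := st
  let (i, ch) := p
  if ch = '{' then
    (if depth = 0 then some i else start_idx, depth + 1, best)
  else if ch = '}' then
    if depth > 0 then
      let depth' := depth - 1
      if depth' = 0 then
        match start_idx with
        | some s =>
            let cand := PySem.List.slice cs (some s) (some (i + 1))
            match best with
            | none => (start_idx, depth', some cand)
            | some b =>
                if cand.length > b.length then (start_idx, depth', some cand)
                else (start_idx, depth', some b)
        | none => (start_idx, depth', best)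
      else (start_idx, depth', best)
    else (start_idx, depth, best)
  else (start_idx, depth, best)

def largest_json_block (text : String) : Option String :=
  (((PySem.List.enumerate text.toList).foldl (pvStepA text.toList)
      (none, 0, none)).2.2).map String.ofList

-- ===== PORT B =====
-- _match's for-loop over text[k:], carrying the absolute position k and the depth; returns the
-- first position where depth hits 0 (early return), none if the loop falls through
def pvMatchGo : List Char → Int → Int → Option Int
  | [], _, _ => none
  | c :: rest, k, depth =>
    if c = '{' then pvMatchGo rest (k + 1) (depth + 1)
    else if c = '}' then
      let d := depth - 1
      if d = 0 then some k else pvMatchGo rest (k + 1) d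
    else pvMatchGo rest (k + 1) depth

-- best-update: keep the longer span, the earlier on ties (Python's strict '>')
def pvUpdB (bp : Option (Int × Int)) (k j : Int) : Option (Int × Int) :=
  match bp with
  | none => some (k, j)
  | some (s0, e0) => if j - k > e0 - s0 then some (k, j) else some (s0, e0)

-- B's outer while-loop: text.find of the opening brace ported as scanning the suffix; on it at
-- position k, _match(text, k) — whose first step on the opener at k sets depth to 1 — is
-- pvMatchGo rest (k+1) 1; on success jump to position j+1 (drop the block from the suffix)
def pvOuter : List Char → Int → Option (Int × Int) → Option (Int × Int)
  | [], _, best => best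
  | c :: rest, k, best =>
    if c = '{' then
      match pvMatchGo rest (k + 1) 1 with
      | none => best
      | some j =>
          pvOuter (rest.drop (j - k).toNat) (j + 1) (pvUpdB best k j)
    else pvOuter rest (k + 1) best
termination_by l _ _ => l.length
decreasing_by
  · simp only [List.length_cons, List.length_drop]; omega
  · simp only [List.length_cons]; omega

def largest_json_block_alt (text : String) : Option String :=
  match pvOuter text.toList 0 none with
  | none => none
  | some (s, e) =>
      some (String.ofList (PySem.List.slice text.toList (some s) (some (e + 1))))

-- ===== PRECONDITION & SPEC =====
def Spec_largest_json_block (text : String) (out : Option String) : Prop := out = largest_json_block_alt text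
instance (text : String) (out : Option String) : Decidable (Spec_largest_json_block text out) := by unfold Spec_largest_json_block; infer_instance

-- ===== CLAIM (what is proved, stated in full; the proofs are below) =====
def Claim_equal_largest_json_block : Prop := ∀ (text : String), Dom_largest_json_block text → Spec_largest_json_block text (largest_json_block text)

-- ===== LEMMAS AND PROOFS =====

-- A's best as produced from B's (start, end) pair
def pvRender (cs : List Char) (bp : Option (Int × Int)) : Option (List Char) :=
  bp.map (fun p => PySem.List.slice cs (some p.1) (some (p.2 + 1)))

-- A's best-update when depth returns to 0 at position j
def pvUpd (cs : List Char) (sA : Option Int) (bestA : Option (List Char)) (j : Int) :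
    Option (List Char) :=
  match sA with
  | none => bestA
  | some s =>
      let cand := PySem.List.slice cs (some s) (some (j + 1))
      match bestA with
      | none => some cand
      | some b => if cand.length > b.length then some cand else some b

lemma pv_length_slice (cs : List Char) (s e : Int) (h0 : 0 ≤ s) (hse : s ≤ e)
    (he : e < (cs.length : Int)) :
    ((PySem.List.slice cs (some s) (some (e + 1))).length : Int) = e + 1 - s := by
  rw [PySem.List.length_slice]
  have hs : PySem.List.clampIdx cs.length s = s.toNat := by
    have := PySem.List.clampIdx_natCast cs.length s.toNat
    rw [Int.toNat_of_nonneg h0] at this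
    omega
  have he1 : PySem.List.clampIdx cs.length (e + 1) = (e + 1).toNat := by
    have := PySem.List.clampIdx_natCast cs.length (e + 1).toNat
    rw [Int.toNat_of_nonneg (by omega)] at this
    omega
  omega

lemma pvMatchGo_bounds : ∀ (l : List Char) (k depth j : Int),
    pvMatchGo l k depth = some j → k ≤ j ∧ j < k + l.length := by
  intro l
  induction l with
  | nil => intro k depth j h; simp [pvMatchGo] at h
  | cons c rest ih =>
    intro k depth j h
    simp only [pvMatchGo] at h
    split_ifs at h with h1 h2 h3
    · have := ih (k + 1) (depth + 1) j h; simp at this ⊢; omega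
    · simp only [Option.some.injEq] at h; simp only [List.length_cons]; omega
    · have := ih (k + 1) (depth - 1) j h; simp at this ⊢; omega
    · have := ih (k + 1) depth j h; simp at this ⊢; omega

lemma pvMatchGo_none_fold (cs : List Char) : ∀ (l : List Char) (k depth : Int)
    (sA : Option Int) (bestA : Option (List Char)), 0 < depth →
    pvMatchGo l k depth = none →
    (((PySem.List.enumerate l k).foldl (pvStepA cs) (sA, depth, bestA)).2.2) = bestA := by
  intro l
  induction l with
  | nil => intro k depth sA bestA _ _; simp [PySem.List.enumerate]
  | cons c rest ih =>
    intro k depth sA bestA hd h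
    rw [PySem.List.enumerate_cons]
    simp only [List.foldl_cons]
    simp only [pvMatchGo] at h
    by_cases h1 : c = '{'
    · have hA : pvStepA cs (sA, depth, bestA) (k, c) =
          (if depth = 0 then some k else sA, depth + 1, bestA) := by simp [pvStepA, h1]
      rw [hA]
      simp [h1] at h
      exact ih (k + 1) (depth + 1) _ _ (by omega) h
    · by_cases h2 : c = '}'
      · simp [h1, h2] at h
        have hne : ¬ (depth - 1 = 0) := by
          intro hc; simp [hc] at h
        rw [if_neg hne] at h
        have hA : pvStepA cs (sA, depth, bestA) (k, c) = (sA, depth - 1, bestA) := by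
          simp [pvStepA, h1, h2, hd, hne]
        rw [hA]
        exact ih (k + 1) (depth - 1) _ _ (by omega) h
      · have hA : pvStepA cs (sA, depth, bestA) (k, c) = (sA, depth, bestA) := by
          simp [pvStepA, h1, h2]
        rw [hA]
        simp [h1, h2] at h
        exact ih (k + 1) depth _ _ hd h

lemma pvMatchGo_some_fold (cs : List Char) : ∀ (l : List Char) (k depth j : Int)
    (sA : Option Int) (bestA : Option (List Char)), 0 < depth →
    pvMatchGo l k depth = some j →
    ((PySem.List.enumerate l k).foldl (pvStepA cs) (sA, depth, bestA)) =
      ((PySem.List.enumerate (l.drop (j + 1 - k).toNat) (j + 1)).foldl (pvStepA cs)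
        (sA, 0, pvUpd cs sA bestA j)) := by
  intro l
  induction l with
  | nil => intro k depth j sA bestA _ h; simp [pvMatchGo] at h
  | cons c rest ih =>
    intro k depth j sA bestA hd h
    have hb := pvMatchGo_bounds (c :: rest) k depth j h
    simp only [List.length_cons] at hb
    rw [PySem.List.enumerate_cons]
    simp only [List.foldl_cons]
    simp only [pvMatchGo] at h
    by_cases h1 : c = '{'
    · simp [h1] at h
      have hb2 := pvMatchGo_bounds rest (k + 1) (depth + 1) j h
      have hA : pvStepA cs (sA, depth, bestA) (k, c) =
          (sA, depth + 1, bestA) := by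
        have : ¬ (depth = 0) := by omega
        simp [pvStepA, h1, this]
      rw [hA, ih (k + 1) (depth + 1) j _ _ (by omega) h]
      have hdrop : (c :: rest).drop (j + 1 - k).toNat = rest.drop (j + 1 - (k + 1)).toNat := by
        have h3 : (j + 1 - k).toNat = (j + 1 - (k + 1)).toNat + 1 := by omega
        rw [h3, List.drop_succ_cons]
      rw [hdrop]
    · by_cases h2 : c = '}'
      · simp [h1, h2] at h
        by_cases h3 : depth - 1 = 0
        · rw [if_pos h3] at h
          have hj : j = k := by simpa using h.symm
          subst hj
          have hA : pvStepA cs (sA, depth, bestA) (j, c) = (sA, 0, pvUpd cs sA bestA j) := by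
            cases sA with
            | none => simp [pvStepA, h1, h2, hd, h3, pvUpd]
            | some s =>
                simp only [pvStepA, h1, h2, hd, h3, pvUpd]
                cases bestA <;> simp [hd, h3] <;> split_ifs <;> simp
          rw [hA]
          have hdrop : (c :: rest).drop (j + 1 - j).toNat = rest := by
            have : (j + 1 - j).toNat = 1 := by omega
            rw [this, List.drop_succ_cons, List.drop_zero]
          rw [hdrop]
        · rw [if_neg h3] at h
          have hb2 := pvMatchGo_bounds rest (k + 1) (depth - 1) j h
          have hA : pvStepA cs (sA, depth, bestA) (k, c) = (sA, depth - 1, bestA) := by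
            simp [pvStepA, h1, h2, hd, h3]
          rw [hA, ih (k + 1) (depth - 1) j _ _ (by omega) h]
          have hdrop : (c :: rest).drop (j + 1 - k).toNat = rest.drop (j + 1 - (k + 1)).toNat := by
            have h4 : (j + 1 - k).toNat = (j + 1 - (k + 1)).toNat + 1 := by omega
            rw [h4, List.drop_succ_cons]
          rw [hdrop]
      · simp [h1, h2] at h
        have hb2 := pvMatchGo_bounds rest (k + 1) depth j h
        have hA : pvStepA cs (sA, depth, bestA) (k, c) = (sA, depth, bestA) := by
          simp [pvStepA, h1, h2]
        rw [hA, ih (k + 1) depth j _ _ hd h]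
        have hdrop : (c :: rest).drop (j + 1 - k).toNat = rest.drop (j + 1 - (k + 1)).toNat := by
          have h4 : (j + 1 - k).toNat = (j + 1 - (k + 1)).toNat + 1 := by omega
          rw [h4, List.drop_succ_cons]
        rw [hdrop]

-- invariant on B's best pair: indices are a valid span inside cs
def pvGood (cs : List Char) (bp : Option (Int × Int)) : Prop :=
  ∀ s e : Int, bp = some (s, e) → 0 ≤ s ∧ s ≤ e ∧ e < (cs.length : Int)

lemma pv_main (cs : List Char) : ∀ (n : Nat) (l : List Char) (k : Int)
    (bp : Option (Int × Int)) (sA : Option Int), l.length = n → 0 ≤ k →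
    k + (l.length : Int) ≤ (cs.length : Int) → pvGood cs bp →
    (((PySem.List.enumerate l k).foldl (pvStepA cs) (sA, 0, pvRender cs bp)).2.2) =
      pvRender cs (pvOuter l k bp) := by
  intro n
  induction n using Nat.strong_induction_on with
  | _ n ih =>
    intro l k bp sA hn hk hlen hgood
    cases l with
    | nil => simp [PySem.List.enumerate, pvOuter]
    | cons c rest =>
      rw [PySem.List.enumerate_cons]
      simp only [List.foldl_cons]
      by_cases h1 : c = '{'
      · have hA : pvStepA cs (sA, 0, pvRender cs bp) (k, c) =
            (some k, 1, pvRender cs bp) := by simp [pvStepA, h1]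
        rw [hA]
        cases hm : pvMatchGo rest (k + 1) 1 with
        | none =>
            rw [pvMatchGo_none_fold cs rest (k + 1) 1 _ _ (by omega) hm]
            simp only [pvOuter, h1, if_true, hm]
        | some j =>
            have hb := pvMatchGo_bounds rest (k + 1) 1 j hm
            simp only [List.length_cons] at hlen
            rw [pvMatchGo_some_fold cs rest (k + 1) 1 j _ _ (by omega) hm]
            -- bounds for the new span (k, j)
            have hkj : k + 1 ≤ j := hb.1
            have hjlt : j < (cs.length : Int) := by push_cast at hlen ⊢; omega
            -- the updated A-best equals the rendered updated B-best
            have hupd : pvUpd cs (some k) (pvRender cs bp) j =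
                pvRender cs (pvUpdB bp k j) := by
              cases bp with
              | none => simp [pvUpd, pvRender, pvUpdB]
              | some p =>
                  obtain ⟨s0, e0⟩ := p
                  obtain ⟨hs0, hse0, he0⟩ := hgood s0 e0 rfl
                  have hc := pv_length_slice cs k j (by omega) (by omega) hjlt
                  have hb0 := pv_length_slice cs s0 e0 hs0 hse0 he0
                  simp only [pvUpd, pvRender, pvUpdB, Option.map_some]
                  by_cases hgt : j - k > e0 - s0
                  · have : (PySem.List.slice cs (some s0) (some (e0 + 1))).length <
                        (PySem.List.slice cs (some k) (some (j + 1))).length := by omega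
                    simp [this, hgt]
                  · have : ¬ ((PySem.List.slice cs (some s0) (some (e0 + 1))).length <
                        (PySem.List.slice cs (some k) (some (j + 1))).length) := by omega
                    simp [this, hgt]
            rw [hupd]
            have hdrop : rest.drop (j + 1 - (k + 1)).toNat = rest.drop (j - k).toNat := by
              congr 1; omega
            rw [hdrop]
            have hlen' : k + 1 + (rest.length : Int) ≤ (cs.length : Int) := by
              push_cast at hlen; omega
            have hn' : rest.length < n := by simp at hn; omega
            have hrec := ih (rest.drop (j - k).toNat).length
              (by simp only [List.length_drop]; exact lt_of_le_of_lt (Nat.sub_le _ _) hn')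
              (rest.drop (j - k).toNat) (j + 1) (pvUpdB bp k j)
              (some k) rfl (by omega)
              (by
                have h5 : (j - k).toNat ≤ rest.length := by omega
                have h6 : (((rest.drop (j - k).toNat).length : Nat) : Int) =
                    (rest.length : Int) - (j - k) := by
                  rw [List.length_drop, Nat.cast_sub h5,
                    Int.toNat_of_nonneg (by omega : (0 : Int) ≤ j - k)]
                rw [h6]
                omega)
              (by
                intro s e he
                cases bp with
                | none =>
                    simp [pvUpdB] at he
                    obtain ⟨rfl, rfl⟩ := he; omega
                | some p =>
                    obtain ⟨s0, e0⟩ := p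
                    obtain ⟨hs0, hse0, he0⟩ := hgood s0 e0 rfl
                    simp only [pvUpdB] at he
                    split_ifs at he <;> simp at he <;> obtain ⟨rfl, rfl⟩ := he <;> omega)
            rw [hrec]
            simp only [pvOuter, h1, if_true, hm]
      · have hA : pvStepA cs (sA, 0, pvRender cs bp) (k, c) = (sA, 0, pvRender cs bp) := by
          by_cases h2 : c = '}' <;> simp [pvStepA, h1, h2]
        rw [hA]
        simp only [List.length_cons] at hlen
        simp only [List.length_cons] at hn
        rw [ih rest.length (by omega) rest (k + 1) bp sA rfl (by omega)
          (by push_cast at hlen ⊢; omega) hgood]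
        simp only [pvOuter, h1, if_false]

-- ===== VERDICT (by name: the statement is the Claim_ definition above) =====
theorem largest_json_block_spec : Claim_equal_largest_json_block := by
  intro text _
  unfold Spec_largest_json_block largest_json_block largest_json_block_alt
  have h := pv_main text.toList text.toList.length text.toList 0 none none rfl le_rfl
    (by simp) (by intro s e h; simp at h)
  have h0 : pvRender text.toList none = none := rfl
  rw [h0] at h
  rw [h]
  cases hB : pvOuter text.toList 0 none with
  | none => simp [pvRender]
  | some p => obtain ⟨s, e⟩ := p; simp [pvRender]
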